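-- pv_equiv track=rewrite | github.com/danielpark95/hq-trivia-solver | src/wiki_answer_model.py | count_coccurrences
-- ===== SOURCE A (Python) =====
-- def count_coccurrences(key_word_index_list1, key_word_index_list2):
-- 	count = 0
-- 	window = 500
-- 	for i in range(len(key_word_index_list1)):
-- 		for j in range(i+1,len(key_word_index_list2)):
-- 			if abs(key_word_index_list1[i] - key_word_index_list2[j]) <= window:
-- 				count += 1
-- 	return count
-- ===== SOURCE B (Python) =====
-- def _bisect_left(a, x):
--     lo, hi = 0, len(a)
--     while lo < hi:
--         mid = (lo + hi) // 2
--         if a[mid] < x: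
--             lo = mid + 1
--         else:
--             hi = mid
--     return lo
--
--
-- def _bisect_right(a, x):
--     lo, hi = 0, len(a)
--     while lo < hi:
--         mid = (lo + hi) // 2
--         if x < a[mid]:
--             hi = mid
--         else:
--             lo = mid + 1
--     return lo
--
--
-- def count_coccurrences(key_word_index_list1, key_word_index_list2):
--     # Iterate i descending, keeping the multiset {list2[j] : j > i} sorted;
--     # each window count is two binary searches instead of an inner scan.
--     n1 = len(key_word_index_list1)
--     suffix = sorted(key_word_index_list2[n1:])
--     count = 0
--     for i in range(n1 - 1, -1, -1):
--         x = key_word_index_list1[i]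
--         count += _bisect_right(suffix, x + 500) - _bisect_left(suffix, x - 500)
--         if i < len(key_word_index_list2):
--             v = key_word_index_list2[i]
--             suffix.insert(_bisect_right(suffix, v), v)
--     return count
-- ===== Notes on version B (the rewrite author's own statement) =====
-- stated objective: faster
-- what changed: Replaces A's inner linear scan over list2[i+1:] by two hand-written binary searches on a sorted suffix multiset that is maintained incrementally while i descends, turning each per-i window count into O(log m) search plus one sorted insertion.
import Mathlib
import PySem

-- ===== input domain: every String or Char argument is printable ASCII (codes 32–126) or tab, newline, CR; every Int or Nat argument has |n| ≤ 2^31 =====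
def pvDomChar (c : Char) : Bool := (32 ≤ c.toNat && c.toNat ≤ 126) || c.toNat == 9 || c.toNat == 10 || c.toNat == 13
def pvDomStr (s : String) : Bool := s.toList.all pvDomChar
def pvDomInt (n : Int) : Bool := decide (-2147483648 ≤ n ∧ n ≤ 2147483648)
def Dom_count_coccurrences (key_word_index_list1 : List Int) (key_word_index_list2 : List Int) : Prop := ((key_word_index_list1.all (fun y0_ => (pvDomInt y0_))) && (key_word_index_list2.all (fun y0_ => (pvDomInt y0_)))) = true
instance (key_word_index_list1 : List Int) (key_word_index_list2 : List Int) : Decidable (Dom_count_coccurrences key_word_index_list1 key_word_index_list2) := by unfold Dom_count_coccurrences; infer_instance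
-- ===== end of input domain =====

-- B replaces A's inner scan by two hand-written binary searches over a sorted suffix multiset
-- maintained while i descends (objective: faster, measured).

-- ===== PORT A =====
-- literal port of A's nested loops: for i in range(len(l1)): for j in range(i+1, len(l2)): if abs(...) <= 500: count += 1
def count_coccurrences (key_word_index_list1 : List Int) (key_word_index_list2 : List Int) : Int :=
  (PySem.List.pyRange 0 (PySem.List.len key_word_index_list1)).foldl (fun count i =>
    (PySem.List.pyRange (i + 1) (PySem.List.len key_word_index_list2)).foldl (fun count j =>
      if |PySem.List.pyGetD key_word_index_list1 i 0 - PySem.List.pyGetD key_word_index_list2 j 0| ≤ 500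
      then count + 1 else count) count) 0

-- ===== PORT B =====
-- _bisect_left's while-loop (hand-written in Source B, transcribed step for step; (lo+hi)//2 on
-- nonnegative ints is Nat division, and a[mid] is exactly pyGetD since 0 ≤ mid)
def pvBLLoop (a : List Int) (x : Int) (lo hi : Nat) : Nat :=
  if lo < hi then
    let mid := (lo + hi) / 2
    if PySem.List.pyGetD a (mid : Int) 0 < x then pvBLLoop a x (mid + 1) hi
    else pvBLLoop a x lo mid
  else lo
termination_by hi - lo
decreasing_by all_goals omega

def pvBL (a : List Int) (x : Int) : Nat := pvBLLoop a x 0 a.length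

-- _bisect_right's while-loop, same transcription
def pvBRLoop (a : List Int) (x : Int) (lo hi : Nat) : Nat :=
  if lo < hi then
    let mid := (lo + hi) / 2
    if x < PySem.List.pyGetD a (mid : Int) 0 then pvBRLoop a x lo mid
    else pvBRLoop a x (mid + 1) hi
  else lo
termination_by hi - lo
decreasing_by all_goals omega

def pvBR (a : List Int) (x : Int) : Nat := pvBRLoop a x 0 a.length

-- one iteration of B's for-loop body (state = (count, suffix))
def pvStep (key_word_index_list1 : List Int) (key_word_index_list2 : List Int)
    (st : Int × List Int) (i : Int) : Int × List Int :=
  let x := PySem.List.pyGetD key_word_index_list1 i 0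
  let c := st.1 + ((pvBR st.2 (x + 500) : Int) - (pvBL st.2 (x - 500) : Int))
  if i < PySem.List.len key_word_index_list2 then
    let v := PySem.List.pyGetD key_word_index_list2 i 0
    (c, PySem.List.insert st.2 ((pvBR st.2 v : Nat) : Int) v)
  else (c, st.2)

-- port of B's count_coccurrences: suffix = sorted(l2[n1:]); for i in range(n1-1, -1, -1): ...
def count_coccurrences_alt (key_word_index_list1 : List Int) (key_word_index_list2 : List Int) : Int :=
  let n1 : Int := PySem.List.len key_word_index_list1
  let suffix0 := PySem.List.sorted (PySem.List.slice key_word_index_list2 (some n1)) (fun y => y)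
  ((PySem.List.pyRange (n1 - 1) (-1) (-1)).foldl
    (pvStep key_word_index_list1 key_word_index_list2) (0, suffix0)).1

-- ===== PRECONDITION & SPEC =====
def Spec_count_coccurrences (key_word_index_list1 : List Int) (key_word_index_list2 : List Int) (out : Int) : Prop := out = count_coccurrences_alt key_word_index_list1 key_word_index_list2
instance (key_word_index_list1 : List Int) (key_word_index_list2 : List Int) (out : Int) : Decidable (Spec_count_coccurrences key_word_index_list1 key_word_index_list2 out) := by unfold Spec_count_coccurrences; infer_instance

-- ===== CLAIM (what is proved, stated in full; the proofs are below) =====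
def Claim_equal_count_coccurrences : Prop := ∀ (key_word_index_list1 : List Int) (key_word_index_list2 : List Int), Dom_count_coccurrences key_word_index_list1 key_word_index_list2 → Spec_count_coccurrences key_word_index_list1 key_word_index_list2 (count_coccurrences key_word_index_list1 key_word_index_list2)

-- ===== LEMMAS AND PROOFS =====

-- the per-i summand both programs compute: window count over l2's suffix beyond i
def pvG (l1 l2 : List Int) (j : Nat) : Int :=
  (List.countP (fun y => decide (|l1.getD j 0 - y| ≤ 500)) (l2.drop (j + 1)) : Int)

-- A equals the sum of the per-i window counts
lemma pvA_char (l1 l2 : List Int) :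
    count_coccurrences l1 l2 = ((List.range l1.length).map (pvG l1 l2)).sum := by
  unfold count_coccurrences
  rw [show PySem.List.len l1 = ((l1.length : Nat) : Int) from rfl, PySem.List.pyRange_zero_natCast,
    List.foldl_map]
  rw [PySem.List.foldl_congr_mem _ _ (fun c j => c + pvG l1 l2 j) 0 ?_]
  · rw [PySem.List.foldl_add]; simp
  · intro acc j hj
    rw [PySem.List.foldl_pyRange_pyGetD l2 0
      (fun c y => if |PySem.List.pyGetD l1 (j : Int) 0 - y| ≤ 500 then c + 1 else c) acc
      (a := (j : Int) + 1) (by positivity)]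
    rw [PySem.List.foldl_ite_add_one]
    unfold pvG
    rw [PySem.List.pyGetD_natCast]
    norm_num

-- split point of (· < v) in a sorted list
lemma pv_split_lt (s : List Int) (v : Int) (hs : s.Pairwise (· ≤ ·)) (j : Nat) (hj : j < s.length) :
    (s[j] < v ↔ j < s.countP (fun y => decide (y < v))) := by
  induction s generalizing j with
  | nil => simp at hj
  | cons y t ih =>
    rw [List.pairwise_cons] at hs
    obtain ⟨hy, ht⟩ := hs
    by_cases h : y < v
    · cases j with
      | zero => simp [h]
      | succ j =>
        simp only [List.length_cons] at hj
        have hih := ih ht j (by omega)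
        simp only [List.getElem_cons_succ, List.countP_cons, h, decide_true, if_true]
        omega
    · have hz : t.countP (fun y => decide (y < v)) = 0 := by
        rw [List.countP_eq_zero]
        intro a ha
        simp only [decide_eq_true_eq]
        have := hy a ha
        omega
      cases j with
      | zero => simp [h, hz]
      | succ j =>
        simp only [List.length_cons] at hj
        simp only [List.getElem_cons_succ, List.countP_cons, h, hz, decide_false,
          Bool.false_eq_true, if_false]
        have := hy (t[j]) (List.getElem_mem _)
        omega

-- split point of (· ≤ v) in a sorted list
lemma pv_split_le (s : List Int) (v : Int) (hs : s.Pairwise (· ≤ ·)) (j : Nat) (hj : j < s.length) :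
    (s[j] ≤ v ↔ j < s.countP (fun y => decide (y ≤ v))) := by
  induction s generalizing j with
  | nil => simp at hj
  | cons y t ih =>
    rw [List.pairwise_cons] at hs
    obtain ⟨hy, ht⟩ := hs
    by_cases h : y ≤ v
    · cases j with
      | zero => simp [h]
      | succ j =>
        simp only [List.length_cons] at hj
        have hih := ih ht j (by omega)
        simp only [List.getElem_cons_succ, List.countP_cons, h, decide_true, if_true]
        omega
    · have hz : t.countP (fun y => decide (y ≤ v)) = 0 := by
        rw [List.countP_eq_zero]
        intro a ha
        simp only [decide_eq_true_eq]
        have := hy a ha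
        omega
      cases j with
      | zero => simp [h, hz]
      | succ j =>
        simp only [List.length_cons] at hj
        simp only [List.getElem_cons_succ, List.countP_cons, h, hz, decide_false,
          Bool.false_eq_true, if_false]
        have := hy (t[j]) (List.getElem_mem _)
        omega

lemma pvBLLoop_eq (s : List Int) (v : Int) (hs : s.Pairwise (· ≤ ·)) :
    ∀ (n lo hi : Nat), hi - lo ≤ n → lo ≤ s.countP (fun y => decide (y < v)) →
      s.countP (fun y => decide (y < v)) ≤ hi → hi ≤ s.length →
      pvBLLoop s v lo hi = s.countP (fun y => decide (y < v)) := by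
  intro n
  induction n with
  | zero =>
    intro lo hi hn h1 h2 h3
    rw [pvBLLoop]
    simp only [if_neg (by omega : ¬ lo < hi)]
    omega
  | succ n ih =>
    intro lo hi hn h1 h2 h3
    rw [pvBLLoop]
    by_cases hlt : lo < hi
    · simp only [if_pos hlt]
      have hmid : (lo + hi) / 2 < s.length := by omega
      have hget : PySem.List.pyGetD s (((lo + hi) / 2 : Nat) : Int) 0 = s[(lo + hi) / 2] := by
        rw [PySem.List.pyGetD_natCast, List.getD_eq_getElem _ _ hmid]
      rw [hget]
      by_cases hc : s[(lo + hi) / 2] < v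
      · have := (pv_split_lt s v hs _ hmid).mp hc
        simp only [if_pos hc]
        exact ih _ _ (by omega) (by omega) (by omega) (by omega)
      · have : ¬ ((lo + hi) / 2 < s.countP (fun y => decide (y < v))) := fun h =>
          hc ((pv_split_lt s v hs _ hmid).mpr h)
        simp only [if_neg hc]
        exact ih _ _ (by omega) (by omega) (by omega) (by omega)
    · simp only [if_neg hlt]
      omega

lemma pvBRLoop_eq (s : List Int) (v : Int) (hs : s.Pairwise (· ≤ ·)) :
    ∀ (n lo hi : Nat), hi - lo ≤ n → lo ≤ s.countP (fun y => decide (y ≤ v)) →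
      s.countP (fun y => decide (y ≤ v)) ≤ hi → hi ≤ s.length →
      pvBRLoop s v lo hi = s.countP (fun y => decide (y ≤ v)) := by
  intro n
  induction n with
  | zero =>
    intro lo hi hn h1 h2 h3
    rw [pvBRLoop]
    simp only [if_neg (by omega : ¬ lo < hi)]
    omega
  | succ n ih =>
    intro lo hi hn h1 h2 h3
    rw [pvBRLoop]
    by_cases hlt : lo < hi
    · simp only [if_pos hlt]
      have hmid : (lo + hi) / 2 < s.length := by omega
      have hget : PySem.List.pyGetD s (((lo + hi) / 2 : Nat) : Int) 0 = s[(lo + hi) / 2] := by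
        rw [PySem.List.pyGetD_natCast, List.getD_eq_getElem _ _ hmid]
      rw [hget]
      by_cases hc : v < s[(lo + hi) / 2]
      · have : ¬ ((lo + hi) / 2 < s.countP (fun y => decide (y ≤ v))) := fun h => by
          have := (pv_split_le s v hs _ hmid).mpr h
          omega
        simp only [if_pos hc]
        exact ih _ _ (by omega) (by omega) (by omega) (by omega)
      · have := (pv_split_le s v hs _ hmid).mp (by omega)
        simp only [if_neg hc]
        exact ih _ _ (by omega) (by omega) (by omega) (by omega)
    · simp only [if_neg hlt]
      omega

lemma pvBL_eq (s : List Int) (v : Int) (hs : s.Pairwise (· ≤ ·)) :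
    pvBL s v = s.countP (fun y => decide (y < v)) :=
  pvBLLoop_eq s v hs s.length 0 s.length (by omega) (by omega)
    List.countP_le_length le_rfl

lemma pvBR_eq (s : List Int) (v : Int) (hs : s.Pairwise (· ≤ ·)) :
    pvBR s v = s.countP (fun y => decide (y ≤ v)) :=
  pvBRLoop_eq s v hs s.length 0 s.length (by omega) (by omega)
    List.countP_le_length le_rfl

-- the two bisect counts differ exactly by the window count (no sortedness needed)
lemma pv_window (s : List Int) (x : Int) :
    s.countP (fun y => decide (y ≤ x + 500)) =
      s.countP (fun y => decide (y < x - 500)) +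
        s.countP (fun y => decide (|x - y| ≤ 500)) := by
  induction s with
  | nil => simp
  | cons y t ih =>
    simp only [List.countP_cons, abs_le, decide_eq_true_eq] at ih ⊢
    split_ifs <;> omega

-- inserting v at _bisect_right's position keeps the list sorted and adds v to the multiset
lemma pv_insert_sorted (s : List Int) (v : Int) (hs : s.Pairwise (· ≤ ·)) :
    (PySem.List.insert s ((pvBR s v : Nat) : Int) v).Pairwise (· ≤ ·) ∧
      (PySem.List.insert s ((pvBR s v : Nat) : Int) v).Perm (v :: s) := by
  have hple : pvBR s v ≤ s.length := by
    rw [pvBR_eq s v hs]; exact List.countP_le_length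
  rw [PySem.List.insert_natCast s (pvBR s v) v hple]
  constructor
  · have htake : ∀ a ∈ s.take (pvBR s v), a ≤ v := by
      intro a ha
      obtain ⟨i, hi, rfl⟩ := List.mem_iff_getElem.mp ha
      rw [List.getElem_take]
      have hilen : i < s.length := by
        have := List.length_take (i := pvBR s v) (l := s); omega
      have : i < s.countP (fun y => decide (y ≤ v)) := by
        rw [← pvBR_eq s v hs]
        have := List.length_take (i := pvBR s v) (l := s); omega
      exact (pv_split_le s v hs i hilen).mpr this
    have hdrop : ∀ b ∈ s.drop (pvBR s v), v ≤ b := by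
      intro b hb
      obtain ⟨i, hi, rfl⟩ := List.mem_iff_getElem.mp hb
      rw [List.getElem_drop]
      have hilen : pvBR s v + i < s.length := by
        have := List.length_drop (i := pvBR s v) (l := s); omega
      have hnc : ¬ (pvBR s v + i < s.countP (fun y => decide (y ≤ v))) := by
        rw [← pvBR_eq s v hs]; omega
      by_cases h : s[pvBR s v + i] ≤ v
      · exact absurd ((pv_split_le s v hs _ hilen).mp h) hnc
      · omega
    apply List.pairwise_append.mpr
    refine ⟨hs.sublist (List.take_sublist _ _), ?_, ?_⟩
    · rw [List.pairwise_cons]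
      exact ⟨hdrop, hs.sublist (List.drop_sublist _ _)⟩
    · intro a ha b hb
      rcases List.mem_cons.mp hb with rfl | hb
      · exact htake a ha
      · exact le_trans (htake a ha) (hdrop b hb)
  · exact List.perm_middle.trans (by rw [List.take_append_drop])

-- the descending index list range(k-1, -1, -1)
def pvDown : Nat → List Int
  | 0 => []
  | k + 1 => (k : Int) :: pvDown k

lemma pv_range_map (n : Nat) :
    (List.range n).map (fun (k : Nat) => (n : Int) - 1 - (k : Int)) = pvDown n := by
  induction n with
  | zero => simp [pvDown]
  | succ n ih =>
    rw [List.range_succ_eq_map, List.map_cons, List.map_map]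
    have : ((fun (k : Nat) => ((n + 1 : Nat) : Int) - 1 - (k : Int)) ∘ Nat.succ)
        = (fun (k : Nat) => (n : Int) - 1 - (k : Int)) := by
      funext k; simp; ring
    rw [this, ih]
    simp [pvDown]

lemma pv_pyRange_down (n : Nat) : PySem.List.pyRange ((n : Int) - 1) (-1) (-1) = pvDown n := by
  rw [← pv_range_map n]
  unfold PySem.List.pyRange
  norm_num
  cases n with
  | zero => simp
  | succ m =>
    rw [if_pos (by omega : 0 < m + 1)]
    apply List.map_congr_left
    intro k _
    ring

-- main invariant of B's loop: after the iterations for indices k-1 … 0, with the suffix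
-- multiset s = {l2[j] : j ≥ k} (sorted), the count has grown by the window counts for i < k
lemma pvBloop (l1 l2 : List Int) :
    ∀ (k : Nat) (c : Int) (s : List Int), k ≤ l1.length → s.Perm (l2.drop k) →
      s.Pairwise (· ≤ ·) →
      ((pvDown k).foldl (pvStep l1 l2) (c, s)).1 = c + ((List.range k).map (pvG l1 l2)).sum := by
  intro k
  induction k with
  | zero => intro c s _ _ _; simp [pvDown]
  | succ k ih =>
    intro c s hk hperm hsort
    have hx : PySem.List.pyGetD l1 ((k : Nat) : Int) 0 = l1.getD k 0 :=
      PySem.List.pyGetD_natCast l1 k 0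
    have hcount : ∀ v : Int, s.countP (fun y => decide (|v - y| ≤ 500))
        = (l2.drop (k + 1)).countP (fun y => decide (|v - y| ≤ 500)) := by
      intro v; exact hperm.countP_eq _
    have hc' : (pvStep l1 l2 (c, s) ((k : Nat) : Int)).1 = c + pvG l1 l2 k := by
      unfold pvStep
      simp only [hx]
      rw [pvBR_eq _ _ hsort, pvBL_eq _ _ hsort]
      have hw := pv_window s (l1.getD k 0)
      have := hcount (l1.getD k 0)
      unfold pvG
      split_ifs <;> omega
    -- step the fold once
    show ((pvDown (k + 1)).foldl (pvStep l1 l2) (c, s)).1 = _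
    have hfold : (pvDown (k + 1)).foldl (pvStep l1 l2) (c, s)
        = (pvDown k).foldl (pvStep l1 l2) (pvStep l1 l2 (c, s) ((k : Nat) : Int)) := rfl
    rw [hfold]
    have hsum : ((List.range (k + 1)).map (pvG l1 l2)).sum
        = ((List.range k).map (pvG l1 l2)).sum + pvG l1 l2 k := by
      rw [List.range_succ, List.map_append, List.sum_append]; simp
    by_cases hklt : (k : Int) < PySem.List.len l2
    · have hk2 : k < l2.length := by
        unfold PySem.List.len at hklt; exact_mod_cast hklt
      have hstep : pvStep l1 l2 (c, s) ((k : Nat) : Int)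
          = (c + pvG l1 l2 k,
             PySem.List.insert s ((pvBR s (PySem.List.pyGetD l2 ((k : Nat) : Int) 0) : Nat) : Int)
               (PySem.List.pyGetD l2 ((k : Nat) : Int) 0)) := by
        unfold pvStep
        rw [if_pos hklt]
        have := hc'
        unfold pvStep at this
        rw [if_pos hklt] at this
        exact Prod.ext this rfl
      rw [hstep]
      have hv : PySem.List.pyGetD l2 ((k : Nat) : Int) 0 = l2[k] := by
        rw [PySem.List.pyGetD_natCast, List.getD_eq_getElem _ _ hk2]
      obtain ⟨hsort', hperm'⟩ :=
        pv_insert_sorted s (PySem.List.pyGetD l2 ((k : Nat) : Int) 0) hsort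
      have hdropk : l2.drop k = l2[k] :: l2.drop (k + 1) := List.drop_eq_getElem_cons hk2
      have hperm'' : (PySem.List.insert s
          ((pvBR s (PySem.List.pyGetD l2 ((k : Nat) : Int) 0) : Nat) : Int)
          (PySem.List.pyGetD l2 ((k : Nat) : Int) 0)).Perm (l2.drop k) := by
        rw [hdropk, hv]
        rw [hv] at hperm'
        exact hperm'.trans (hperm.cons _)
      rw [ih _ _ (by omega) hperm'' hsort', hsum]
      ring
    · have hk2 : l2.length ≤ k := by
        unfold PySem.List.len at hklt; omega
      have hstep : pvStep l1 l2 (c, s) ((k : Nat) : Int) = (c + pvG l1 l2 k, s) := by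
        unfold pvStep
        rw [if_neg hklt]
        have := hc'
        unfold pvStep at this
        rw [if_neg hklt] at this
        exact Prod.ext this rfl
      rw [hstep]
      have hperm'' : s.Perm (l2.drop k) := by
        rw [List.drop_eq_nil_of_le hk2]
        rw [List.drop_eq_nil_of_le (by omega)] at hperm
        exact hperm
      rw [ih _ _ (by omega) hperm'' hsort, hsum]
      ring

-- ===== VERDICT (by name: the statement is the Claim_ definition above) =====
theorem count_coccurrences_spec : Claim_equal_count_coccurrences := by
  intro l1 l2 _
  unfold Spec_count_coccurrences count_coccurrences_alt
  rw [pvA_char]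
  show _ = (((PySem.List.pyRange ((PySem.List.len l1) - 1) (-1) (-1))).foldl
    (pvStep l1 l2)
    (0, PySem.List.sorted (PySem.List.slice l2 (some (PySem.List.len l1))) (fun y => y))).1
  rw [show PySem.List.len l1 = ((l1.length : Nat) : Int) from rfl]
  rw [PySem.List.slice_from l2 (by positivity), pv_pyRange_down l1.length]
  rw [Int.toNat_natCast]
  rw [pvBloop l1 l2 l1.length 0 (PySem.List.sorted (l2.drop l1.length) (fun y => y)) le_rfl
    (PySem.List.sorted_perm _ _ _) (PySem.List.sorted_pairwise _ _)]
  simp
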